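-- pv_equiv track=rewrite | github.com/m0nggh/AOC2022 | solutions/day3.py | part_two
-- ===== SOURCE A (Python) =====
-- def calculate_priority(ch):
--     score = 0
--     if ch.isupper():
--         score += 26  # add for capital letter first
--         ch = ch.lower()
--     score += ord(ch) - ord('a') + 1  # comapre lower letter
--     return score
--
-- def part_two(data):
--     # calculate priorities for groups of 3
--     total = 0
--     for i in range(0, len(data), 3):
--         m = {}  # use a map to store the count of the letters
--         for j in range(3):
--             for ch in data[i + j]:
--                 # only add unique count
--                 if m.get(ch, 0) == j:
--                     m[ch] = m.get(ch, 0) + 1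
--         # find the common letter
--         common = ''
--         for ch, count in m.items():
--             if count == 3:
--                 common = ch
--                 break
--         total += calculate_priority(common)
--     return total
-- ===== SOURCE B (Python) =====
-- def calculate_priority(ch):
--     score = 0
--     if ch.isupper():
--         score += 26  # add for capital letter first
--         ch = ch.lower()
--     score += ord(ch) - ord('a') + 1  # comapre lower letter
--     return score
--
-- def part_two(data):
--     # set intersection per group of 3; first common char in the first string's order
--     total = 0
--     for i in range(0, len(data), 3):
--         a, b, c = data[i], data[i + 1], data[i + 2]
--         bc = set(b) & set(c)
--         common = next(ch for ch in a if ch in bc)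
--         total += calculate_priority(common)
--     return total
-- ===== Notes on version B (the rewrite author's own statement) =====
-- stated objective: idiomatic
-- what changed: Replaces the three-pass count dictionary per group with a set intersection of the second and third strings plus a first-match scan of the first string (next/generator), keeping the same first-common-in-a tie-breaking.
import Mathlib
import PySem

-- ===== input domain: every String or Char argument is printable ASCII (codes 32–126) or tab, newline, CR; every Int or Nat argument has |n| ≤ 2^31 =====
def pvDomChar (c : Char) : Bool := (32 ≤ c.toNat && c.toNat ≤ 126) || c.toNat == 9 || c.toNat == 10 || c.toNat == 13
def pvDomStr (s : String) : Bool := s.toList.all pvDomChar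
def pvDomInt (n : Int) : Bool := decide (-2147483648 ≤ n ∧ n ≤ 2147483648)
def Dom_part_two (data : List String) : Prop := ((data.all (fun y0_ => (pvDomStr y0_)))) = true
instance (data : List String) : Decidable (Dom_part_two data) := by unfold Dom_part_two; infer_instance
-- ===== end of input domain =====

-- B replaces the per-group three-pass count dictionary with a set intersection of the
-- second and third strings plus a first-match scan of the first string (idiomatic; same cost).

-- ===== PORT A =====
-- ch.isupper()/ch.lower()/ord(ch) on a single char, exact on Dom's printable ASCII
def calcPriority (ch : Char) : Int :=
  let score : Int := 0
  if ch.isUpper then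
    let score := score + 26
    let ch := ch.toLower
    score + (ch.toNat : Int) - ('a'.toNat : Int) + 1
  else
    score + (ch.toNat : Int) - ('a'.toNat : Int) + 1

def part_two (data : List String) : Int :=
  (PySem.List.pyRange 0 (data.length : Int) 3).foldl (fun total i =>
    let m : PySem.Dict Char Int := PySem.Dict.empty
    let m := (PySem.List.pyRange 0 3 1).foldl (fun m j =>
      (PySem.List.pyGetD data (i + j) "").toList.foldl (fun m ch =>
        if m.getD ch 0 == j then m.insert ch (m.getD ch 0 + 1) else m) m) m
    -- for ch, count in m.items(): if count == 3: common = ch; break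
    let common : Option Char := (List.find? (fun p => p.2 == (3 : Int)) m.items).map Prod.fst
    -- none ↔ Python's common stays '' (then calculate_priority('') raises TypeError; outside Pre_)
    total + (match common with | some ch => calcPriority ch | none => 0)) 0

-- ===== PORT B =====
def part_two_alt (data : List String) : Int :=
  (PySem.List.pyRange 0 (data.length : Int) 3).foldl (fun total i =>
    let a := (PySem.List.pyGetD data i "").toList
    let b := (PySem.List.pyGetD data (i + 1) "").toList
    let c := (PySem.List.pyGetD data (i + 2) "").toList
    let bc := PySem.Set.inter (PySem.Set.ofList b) (PySem.Set.ofList c)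
    let common : Option Char := a.find? (fun ch => bc.contains ch)
    -- none ↔ Python's next(...) raises StopIteration (outside Pre_)
    total + (match common with | some ch => calcPriority ch | none => 0)) 0

-- ===== PRECONDITION & SPEC =====
-- Pre_ excludes exactly the inputs where the Python A raises: lists whose length is not a
-- multiple of 3 (IndexError) and groups with no char common to all three strings (TypeError).
def Pre_part_two (data : List String) : Prop :=
  data.length % 3 = 0 ∧
  ∀ k < data.length, k % 3 = 0 →
    ((data.getD k "").toList.any (fun ch =>
      ((data.getD (k+1) "").toList.contains ch) &&
      ((data.getD (k+2) "").toList.contains ch))) = true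
instance (data : List String) : Decidable (Pre_part_two data) := by unfold Pre_part_two; infer_instance

def pvWitness_part_two : List String := ["aA", "ab", "ca"]

def Spec_part_two (data : List String) (out : Int) : Prop := out = part_two_alt data
instance (data : List String) (out : Int) : Decidable (Spec_part_two data out) := by unfold Spec_part_two; infer_instance

-- ===== CLAIM (what is proved, stated in full; the proofs are below) =====
def Claim_equal_part_two : Prop := ∀ (data : List String), Dom_part_two data → Pre_part_two data → Spec_part_two data (part_two data)

-- ===== LEMMAS AND PROOFS =====

lemma getD_mk_map (s : List Char) (hs : s.Nodup) (g : Char → Int) (x : Char) :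
    (PySem.Dict.mk (s.map fun ch => (ch, g ch))).getD x 0 = if x ∈ s then g x else 0 := by
  induction s with
  | nil => simp [PySem.Dict.getD, PySem.Dict.get?]
  | cons y t ih =>
    rw [List.nodup_cons] at hs
    obtain ⟨hy, ht⟩ := hs
    rw [PySem.Dict.getD_eq_get?_getD, List.map_cons, PySem.Dict.get?_mk_cons]
    by_cases hxy : y = x
    · subst hxy; simp [List.mem_cons]
    · have := ih ht
      rw [PySem.Dict.getD_eq_get?_getD] at this
      simp only [beq_iff_eq, hxy, if_false, List.mem_cons]
      rw [this]
      simp [Ne.symm hxy]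
lemma contains_mk_map (s : List Char) (g : Char → Int) (x : Char) :
    (PySem.Dict.mk (s.map fun ch => (ch, g ch))).contains x = decide (x ∈ s) := by
  rw [PySem.Dict.contains_eq_decide_mem_keys]
  simp [PySem.Dict.keys]
lemma pass0_inv (l : List Char) (s : PySem.Set Char) (hs : List.Nodup s) :
    l.foldl (fun m ch => if m.getD ch 0 == (0 : Int) then m.insert ch (m.getD ch 0 + 1) else m)
      (PySem.Dict.mk (s.map fun ch => (ch, (1 : Int))))
    = PySem.Dict.mk ((PySem.Set.update s l).map fun ch => (ch, (1 : Int))) := by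
  induction l generalizing s with
  | nil => rfl
  | cons x t ih =>
    rw [List.foldl_cons]
    have hget := getD_mk_map s hs (fun _ => (1 : Int)) x
    have hstep : PySem.Set.update s (x :: t) = PySem.Set.update (PySem.Set.add s x) t := rfl
    by_cases hx : x ∈ s
    · have hcond : ((PySem.Dict.mk (s.map fun ch => (ch, (1:Int)))).getD x 0 == (0:Int)) = false := by
        rw [hget]; simp [hx]
      rw [hcond]
      simp only [Bool.false_eq_true, if_false]
      have hadd : PySem.Set.add s x = s := by
        show (if s.contains x then s else s ++ [x]) = s
        simp [List.contains_eq_mem, hx]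
      rw [hstep, hadd]
      exact ih s hs
    · have hcond : ((PySem.Dict.mk (s.map fun ch => (ch, (1:Int)))).getD x 0 == (0:Int)) = true := by
        rw [hget]; simp [hx]
      rw [hcond]
      simp only [if_true]
      have hcon : (PySem.Dict.mk (s.map fun ch => (ch, (1:Int)))).contains x = false := by
        rw [contains_mk_map]; simp [hx]
      have hadd : PySem.Set.add s x = s ++ [x] := by
        show (if s.contains x then s else s ++ [x]) = s ++ [x]
        simp [List.contains_eq_mem, hx]
      have hdict : ((PySem.Dict.mk (s.map fun ch => (ch, (1:Int)))).insert x ((PySem.Dict.mk (s.map fun ch => (ch, (1:Int)))).getD x 0 + 1))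
          = PySem.Dict.mk ((PySem.Set.add s x).map fun ch => (ch, (1:Int))) := by
        apply PySem.Dict.ext
        rw [PySem.Dict.items_insert_of_not_contains _ _ hcon, hget, hadd]
        simp [hx]
      rw [hdict, hstep]
      exact ih (PySem.Set.add s x) (PySem.Set.nodup_add s x hs)
lemma bump_inv (j : Int) (hj : j ≠ 0) (g : Char → Int) (s : List Char) (hs : s.Nodup)
    (l p : List Char) :
    l.foldl (fun m ch => if m.getD ch 0 == j then m.insert ch (m.getD ch 0 + 1) else m)
      (PySem.Dict.mk (s.map fun ch => (ch, if ch ∈ p ∧ g ch = j then j + 1 else g ch)))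
    = PySem.Dict.mk (s.map fun ch => (ch, if ch ∈ p ++ l ∧ g ch = j then j + 1 else g ch)) := by
  induction l generalizing p with
  | nil => simp
  | cons x t ih =>
    rw [List.foldl_cons]
    have hget := getD_mk_map s hs (fun ch => if ch ∈ p ∧ g ch = j then j + 1 else g ch) x
    have hnext : PySem.Dict.mk (s.map fun ch => (ch, if ch ∈ p ++ [x] ∧ g ch = j then j + 1 else g ch))
        = PySem.Dict.mk (s.map fun ch => (ch, if ch ∈ p ∧ g ch = j then j + 1 else g ch)) ∨
        (x ∈ s ∧ x ∉ p ∧ g x = j) := by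
      by_cases hc : x ∈ s ∧ x ∉ p ∧ g x = j
      · exact Or.inr hc
      · left
        apply PySem.Dict.ext
        simp only []
        apply List.map_congr_left
        intro ch hch
        by_cases hcx : ch = x
        · subst hcx
          have : ¬ (ch ∉ p ∧ g ch = j) := fun h => hc ⟨hch, h.1, h.2⟩
          by_cases hgp : ch ∈ p
          · simp [hgp]
          · have hgj : g ch ≠ j := by tauto
            simp [hgp, hgj]
        · simp [List.mem_append, hcx]
    by_cases hc : x ∈ s ∧ x ∉ p ∧ g x = j
    · obtain ⟨hxs, hxp, hgx⟩ := hc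
      have hcond : ((PySem.Dict.mk (s.map fun ch => (ch, if ch ∈ p ∧ g ch = j then j + 1 else g ch))).getD x 0 == j) = true := by
        rw [hget]; simp [hxs, hxp, hgx]
      rw [hcond]
      simp only [if_true]
      have hcon : (PySem.Dict.mk (s.map fun ch => (ch, if ch ∈ p ∧ g ch = j then j + 1 else g ch))).contains x = true := by
        rw [contains_mk_map]; simp [hxs]
      have hdict : ((PySem.Dict.mk (s.map fun ch => (ch, if ch ∈ p ∧ g ch = j then j + 1 else g ch))).insert x
            ((PySem.Dict.mk (s.map fun ch => (ch, if ch ∈ p ∧ g ch = j then j + 1 else g ch))).getD x 0 + 1))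
          = PySem.Dict.mk (s.map fun ch => (ch, if ch ∈ p ++ [x] ∧ g ch = j then j + 1 else g ch)) := by
        apply PySem.Dict.ext
        rw [PySem.Dict.items_insert_of_contains _ _ hcon, hget]
        simp only [List.map_map]
        apply List.map_congr_left
        intro ch hch
        by_cases hcx : ch = x
        · subst hcx
          simp [hxs, hxp, hgx]
        · have h1 : (ch == x) = false := by simp [hcx]
          simp [Function.comp_apply, List.mem_append, hcx]
      rw [hdict]
      have : p ++ x :: t = (p ++ [x]) ++ t := by simp
      rw [this]
      exact ih (p ++ [x])
    · have hcond : ((PySem.Dict.mk (s.map fun ch => (ch, if ch ∈ p ∧ g ch = j then j + 1 else g ch))).getD x 0 == j) = false := by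
        rw [hget]
        by_cases hxs : x ∈ s
        · have : ¬ (x ∉ p ∧ g x = j) := fun h => hc ⟨hxs, h.1, h.2⟩
          by_cases hxp : x ∈ p
          · by_cases hgx : g x = j
            · simp [hxs, hxp, hgx]
            · simp [hxs, hxp, hgx]
          · have hgx : g x ≠ j := by tauto
            simp [hxs, hxp, hgx]
        · simp [hxs]; omega
      rw [hcond]
      simp only [Bool.false_eq_true, if_false]
      rcases hnext with heq | hcc
      · rw [← heq]
        have : p ++ x :: t = (p ++ [x]) ++ t := by simp
        rw [this]
        exact ih (p ++ [x])
      · exact absurd hcc hc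
lemma find?_update (q : Char → Bool) (l : List Char) (s : PySem.Set Char) :
    List.find? q (PySem.Set.update s l) = List.find? q (s ++ l) := by
  induction l generalizing s with
  | nil => simp [PySem.Set.update]
  | cons x t ih =>
    have hstep : PySem.Set.update s (x :: t) = PySem.Set.update (PySem.Set.add s x) t := rfl
    rw [hstep, ih]
    by_cases hx : x ∈ s
    · have hadd : PySem.Set.add s x = s := by
        show (if s.contains x then s else s ++ [x]) = s
        simp [List.contains_eq_mem, hx]
      rw [hadd, List.find?_append, List.find?_append]
      cases hfs : List.find? q s with
      | some y => rfl
      | none =>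
        have hqx : q x = false := by
          have := List.find?_eq_none.mp hfs x hx
          simpa using this
        simp [hqx]
    · have hadd : PySem.Set.add s x = s ++ [x] := by
        show (if s.contains x then s else s ++ [x]) = s ++ [x]
        simp [List.contains_eq_mem, hx]
      rw [hadd]
      simp [List.find?_append]
lemma group_common (A B C : List Char) :
    (List.find? (fun p => p.2 == (3 : Int))
      (PySem.Dict.items
        (C.foldl (fun m ch => if m.getD ch 0 == (2 : Int) then m.insert ch (m.getD ch 0 + 1) else m)
          (B.foldl (fun m ch => if m.getD ch 0 == (1 : Int) then m.insert ch (m.getD ch 0 + 1) else m)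
            (A.foldl (fun m ch => if m.getD ch 0 == (0 : Int) then m.insert ch (m.getD ch 0 + 1) else m)
              PySem.Dict.empty))))).map Prod.fst
    = A.find? (fun ch => (PySem.Set.inter (PySem.Set.ofList B) (PySem.Set.ofList C)).contains ch) := by
  have hnd : (PySem.Set.ofList A).Nodup := PySem.Set.nodup_ofList A
  have h0 : A.foldl (fun m ch => if m.getD ch 0 == (0 : Int) then m.insert ch (m.getD ch 0 + 1) else m) PySem.Dict.empty
      = PySem.Dict.mk ((PySem.Set.ofList A).map fun ch => (ch, (1 : Int))) := by
    simpa using pass0_inv A [] (by simp)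
  have h1 : B.foldl (fun m ch => if m.getD ch 0 == (1 : Int) then m.insert ch (m.getD ch 0 + 1) else m)
        (PySem.Dict.mk ((PySem.Set.ofList A).map fun ch => (ch, (1 : Int))))
      = PySem.Dict.mk ((PySem.Set.ofList A).map fun ch => (ch, if ch ∈ B then (2 : Int) else 1)) := by
    calc B.foldl (fun m ch => if m.getD ch 0 == (1 : Int) then m.insert ch (m.getD ch 0 + 1) else m)
          (PySem.Dict.mk ((PySem.Set.ofList A).map fun ch => (ch, (1 : Int))))
        = B.foldl (fun m ch => if m.getD ch 0 == (1 : Int) then m.insert ch (m.getD ch 0 + 1) else m)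
          (PySem.Dict.mk ((PySem.Set.ofList A).map fun ch => (ch, if ch ∈ ([] : List Char) ∧ (1 : Int) = 1 then 1 + 1 else 1))) := by
          rw [show (PySem.Dict.mk ((PySem.Set.ofList A).map fun ch => (ch, (1 : Int))))
              = (PySem.Dict.mk ((PySem.Set.ofList A).map fun ch => (ch, if ch ∈ ([] : List Char) ∧ (1 : Int) = 1 then 1 + 1 else 1)))
            from PySem.Dict.ext (List.map_congr_left (fun ch _ => by simp))]
      _ = PySem.Dict.mk ((PySem.Set.ofList A).map fun ch => (ch, if ch ∈ [] ++ B ∧ (1 : Int) = 1 then 1 + 1 else 1)) :=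
          bump_inv 1 (by norm_num) (fun _ => (1 : Int)) (PySem.Set.ofList A) hnd B []
      _ = PySem.Dict.mk ((PySem.Set.ofList A).map fun ch => (ch, if ch ∈ B then (2 : Int) else 1)) :=
          PySem.Dict.ext (List.map_congr_left (fun ch _ => by by_cases hb : ch ∈ B <;> simp [hb]))
  have h2 : C.foldl (fun m ch => if m.getD ch 0 == (2 : Int) then m.insert ch (m.getD ch 0 + 1) else m)
        (PySem.Dict.mk ((PySem.Set.ofList A).map fun ch => (ch, if ch ∈ B then (2 : Int) else 1)))
      = PySem.Dict.mk ((PySem.Set.ofList A).map fun ch => (ch, if ch ∈ B ∧ ch ∈ C then (3 : Int) else if ch ∈ B then 2 else 1)) := by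
    calc C.foldl (fun m ch => if m.getD ch 0 == (2 : Int) then m.insert ch (m.getD ch 0 + 1) else m)
          (PySem.Dict.mk ((PySem.Set.ofList A).map fun ch => (ch, if ch ∈ B then (2 : Int) else 1)))
        = C.foldl (fun m ch => if m.getD ch 0 == (2 : Int) then m.insert ch (m.getD ch 0 + 1) else m)
          (PySem.Dict.mk ((PySem.Set.ofList A).map fun ch => (ch, if ch ∈ ([] : List Char) ∧ (if ch ∈ B then (2 : Int) else 1) = 2 then 2 + 1 else if ch ∈ B then (2 : Int) else 1))) := by
          rw [show (PySem.Dict.mk ((PySem.Set.ofList A).map fun ch => (ch, if ch ∈ B then (2 : Int) else 1)))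
              = (PySem.Dict.mk ((PySem.Set.ofList A).map fun ch => (ch, if ch ∈ ([] : List Char) ∧ (if ch ∈ B then (2 : Int) else 1) = 2 then 2 + 1 else if ch ∈ B then (2 : Int) else 1)))
            from PySem.Dict.ext (List.map_congr_left (fun ch _ => by simp))]
      _ = PySem.Dict.mk ((PySem.Set.ofList A).map fun ch => (ch, if ch ∈ [] ++ C ∧ (if ch ∈ B then (2 : Int) else 1) = 2 then 2 + 1 else if ch ∈ B then (2 : Int) else 1)) :=
          bump_inv 2 (by norm_num) (fun ch => if ch ∈ B then (2 : Int) else 1) (PySem.Set.ofList A) hnd C []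
      _ = PySem.Dict.mk ((PySem.Set.ofList A).map fun ch => (ch, if ch ∈ B ∧ ch ∈ C then (3 : Int) else if ch ∈ B then 2 else 1)) :=
          PySem.Dict.ext (List.map_congr_left (fun ch _ => by
            by_cases hb : ch ∈ B <;> by_cases hc : ch ∈ C <;> simp [hb, hc]))
  rw [h0, h1, h2]
  have hitems : ∀ (l : List (Char × Int)), PySem.Dict.items (PySem.Dict.mk l) = l := fun _ => rfl
  rw [hitems, List.find?_map, Option.map_map]
  have hpred : ((fun p => p.2 == (3 : Int)) ∘ (fun ch => (ch, if ch ∈ B ∧ ch ∈ C then (3 : Int) else if ch ∈ B then 2 else 1)))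
      = (fun ch => (PySem.Set.inter (PySem.Set.ofList B) (PySem.Set.ofList C)).contains ch) := by
    funext ch
    simp only [Function.comp_apply]
    have hmem : (PySem.Set.inter (PySem.Set.ofList B) (PySem.Set.ofList C)).contains ch
        = decide (ch ∈ B ∧ ch ∈ C) := by
      rw [show (PySem.Set.inter (PySem.Set.ofList B) (PySem.Set.ofList C)).contains ch
            = List.contains (PySem.Set.inter (PySem.Set.ofList B) (PySem.Set.ofList C)) ch from rfl,
          List.contains_eq_mem]
      simp [PySem.Set.mem_inter, PySem.Set.mem_ofList]
    rw [hmem]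
    by_cases hb : ch ∈ B <;> by_cases hc : ch ∈ C <;> simp [hb, hc]
  rw [hpred]
  have hfst : (Prod.fst ∘ (fun ch : Char => (ch, if ch ∈ B ∧ ch ∈ C then (3 : Int) else if ch ∈ B then 2 else 1))) = id := rfl
  rw [hfst, Option.map_id]
  simpa [PySem.Set.ofList] using
    find?_update (fun ch => (PySem.Set.inter (PySem.Set.ofList B) (PySem.Set.ofList C)).contains ch) A []
-- ===== VERDICT (by name: the statement is the Claim_ definition above) =====
theorem part_two_spec : Claim_equal_part_two := by
  intro data _ _
  unfold Spec_part_two part_two part_two_alt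
  have hr3 : PySem.List.pyRange 0 3 1 = [0, 1, 2] := by decide
  apply PySem.List.foldl_congr_mem
  intro acc i _
  simp only [hr3, List.foldl_cons, List.foldl_nil, add_zero]
  rw [group_common ((PySem.List.pyGetD data i "").toList) ((PySem.List.pyGetD data (i+1) "").toList)
      ((PySem.List.pyGetD data (i+2) "").toList)]
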